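-- pv_equiv track=rewrite | github.com/SCPR/firetracker | calfire_tracker/templatetags/tracker_tags.py | rows_distributed
-- ===== SOURCE A (Python) =====
-- def rows_distributed(thelist, n):
--     """
--     Break a list into ``n`` rows, distributing columns as evenly as possible
--     across the rows. For example::
--
--         >>> l = range(10)
--
--         >>> rows_distributed(l, 2)
--         [[0, 1, 2, 3, 4], [5, 6, 7, 8, 9]]
--
--         >>> rows_distributed(l, 3)
--         [[0, 1, 2, 3], [4, 5, 6], [7, 8, 9]]
--
--         >>> rows_distributed(l, 4)
--         [[0, 1, 2], [3, 4, 5], [6, 7], [8, 9]]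
--
--         >>> rows_distributed(l, 5)
--         [[0, 1], [2, 3], [4, 5], [6, 7], [8, 9]]
--
--         >>> rows_distributed(l, 9)
--         [[0, 1], [2], [3], [4], [5], [6], [7], [8], [9]]
--
--         # This filter will always return `n` rows, even if some are empty:
--         >>> rows(range(2), 3)
--         [[0], [1], []]
--     """
--     try:
--         n = int(n)
--         thelist = list(thelist)
--     except (ValueError, TypeError):
--         return [thelist]
--     list_len = len(thelist)
--     split = list_len // n
--
--     remainder = list_len % n
--     offset = 0
--     rows = []
--     for i in range(n):
--         if remainder:
--             start, end = (split+1)*i, (split+1)*(i+1)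
--         else:
--             start, end = split*i+offset, split*(i+1)+offset
--         rows.append(thelist[start:end])
--         if remainder:
--             remainder -= 1
--             offset += 1
--     return rows
-- ===== SOURCE B (Python) =====
-- def rows_distributed(thelist, n):
--     try:
--         n = int(n)
--         thelist = list(thelist)
--     except (ValueError, TypeError):
--         return [thelist]
--     k, m = divmod(len(thelist), n)
--     sizes = [k + 1] * m + [k] * (n - m)
--     it = iter(thelist)
--     return [[next(it) for _ in range(s)] for s in sizes]
-- ===== Notes on version B (the rewrite author's own statement) =====
-- stated objective: simpler
-- what changed: Replaces A's per-iteration remainder/offset bookkeeping and index-computed slicing with a divmod-derived row-size table [k+1]*m + [k]*(n-m) that is drained sequentially from an iterator over the list.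
import Mathlib
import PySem

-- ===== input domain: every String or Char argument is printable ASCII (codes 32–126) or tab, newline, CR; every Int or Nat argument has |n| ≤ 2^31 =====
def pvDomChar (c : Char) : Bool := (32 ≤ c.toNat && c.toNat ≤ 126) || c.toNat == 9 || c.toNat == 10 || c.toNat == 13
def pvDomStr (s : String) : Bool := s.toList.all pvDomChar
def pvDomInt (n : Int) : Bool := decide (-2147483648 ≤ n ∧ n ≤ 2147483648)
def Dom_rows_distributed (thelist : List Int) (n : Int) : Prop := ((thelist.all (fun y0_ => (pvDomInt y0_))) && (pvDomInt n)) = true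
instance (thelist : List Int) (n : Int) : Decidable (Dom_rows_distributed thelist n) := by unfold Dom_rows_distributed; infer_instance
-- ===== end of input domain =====

-- B replaces A's offset/remainder bookkeeping and index-range slicing by a divmod size
-- table drained sequentially from the front of the list (objective: simpler).

-- ===== PORT A =====
-- the 'for i in range(n)' loop with state (remainder, offset, rows)
def rowsLoopA (xs : List Int) (split : Int) : List Int → Int → Int → List (List Int) → List (List Int)
  | [], _, _, rows => rows
  | i :: is, remainder, offset, rows =>
    if remainder ≠ 0 then
      rowsLoopA xs split is (remainder - 1) (offset + 1)
        (rows ++ [PySem.List.slice xs (some ((split+1)*i)) (some ((split+1)*(i+1)))])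
    else
      rowsLoopA xs split is remainder offset
        (rows ++ [PySem.List.slice xs (some (split*i+offset)) (some (split*(i+1)+offset))])

-- int(n)/list(thelist) always succeed on an Int and a List Int, so the 'except' branch is dead
def rows_distributed (thelist : List Int) (n : Int) : List (List Int) :=
  let list_len : Int := thelist.length
  let split := PySem.Int.floordiv list_len n      -- n = 0 raises ZeroDivisionError: excluded by Pre_
  let remainder := PySem.Int.mod list_len n
  rowsLoopA thelist split (PySem.List.pyRange 0 n 1) remainder 0 []

-- ===== PORT B =====
-- '[next(it) for _ in range(s)]' pulls s elements off the front of what remains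
def rowsDrain (xs : List Int) : List Int → List (List Int)
  | [] => []
  | s :: rest => xs.take s.toNat :: rowsDrain (xs.drop s.toNat) rest

def rows_distributed_alt (thelist : List Int) (n : Int) : List (List Int) :=
  let k := PySem.Int.floordiv (thelist.length : Int) n   -- divmod: n = 0 raises, excluded by Pre_
  let m := PySem.Int.mod (thelist.length : Int) n
  let sizes := List.replicate m.toNat (k + 1) ++ List.replicate (n - m).toNat k
  rowsDrain thelist sizes

-- ===== PRECONDITION & SPEC =====
-- n = 0 makes both Pythons raise ZeroDivisionError (list_len // n resp. divmod)
def Pre_rows_distributed (thelist : List Int) (n : Int) : Prop := n ≠ 0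
instance (thelist : List Int) (n : Int) : Decidable (Pre_rows_distributed thelist n) := by unfold Pre_rows_distributed; infer_instance
def pvWitness_rows_distributed : List Int × Int := ([0, 1, 2, 3, 4, 5, 6, 7, 8, 9], 3)

def Spec_rows_distributed (thelist : List Int) (n : Int) (out : List (List Int)) : Prop := out = rows_distributed_alt thelist n
instance (thelist : List Int) (n : Int) (out : List (List Int)) : Decidable (Spec_rows_distributed thelist n out) := by unfold Spec_rows_distributed; infer_instance

-- ===== CLAIM (what is proved, stated in full; the proofs are below) =====
def Claim_equal_rows_distributed : Prop := ∀ (thelist : List Int) (n : Int), Dom_rows_distributed thelist n → Pre_rows_distributed thelist n → Spec_rows_distributed thelist n (rows_distributed thelist n)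

-- ===== LEMMAS AND PROOFS =====

-- after the remainder is exhausted (remainder = 0, offset frozen at off):
-- the loop slices rows of size k starting at k*i+off, which is exactly draining sizes k
lemma rowsLoopA_phase2 (xs : List Int) (k : Int) (hk : 0 ≤ k) :
    ∀ (cnt : Nat) (i₀ off s : Int) (rows : List (List Int)),
      0 ≤ i₀ → 0 ≤ off → s = k * i₀ + off →
      rowsLoopA xs k (PySem.List.pyRange i₀ (i₀ + cnt) 1) 0 off rows =
        rows ++ rowsDrain (xs.drop s.toNat) (List.replicate cnt k) := by
  intro cnt
  induction cnt with
  | zero =>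
    intro i₀ off s rows _ _ _
    have h : PySem.List.pyRange i₀ (i₀ + (0:Nat)) 1 = [] := by
      rw [PySem.List.pyRange_one]; simp
    rw [h]; simp [rowsLoopA, rowsDrain]
  | succ c ih =>
    intro i₀ off s rows hi hoff hs
    have hlt : i₀ < i₀ + ((c+1 : Nat) : Int) := by push_cast; omega
    rw [PySem.List.pyRange_one_cons hlt]
    have hs0 : 0 ≤ s := by
      have := mul_nonneg hk hi; omega
    have hstep : k * (i₀ + 1) + off = s + k := by rw [hs]; ring
    simp only [rowsLoopA, if_neg (by simp : ¬ (0:Int) ≠ 0)]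
    have hrange : i₀ + ((c+1 : Nat) : Int) = (i₀ + 1) + (c : Nat) := by push_cast; ring
    rw [hrange, ih (i₀ + 1) off (s + k) _ (by omega) hoff (by rw [hstep])]
    have hslice : PySem.List.slice xs (some (k * i₀ + off)) (some (k * (i₀ + 1) + off)) =
        (xs.drop s.toNat).take k.toNat := by
      rw [PySem.List.slice_toNat xs (by omega) (by rw [hstep]; omega), ← hs, hstep]
      congr 1; omega
    rw [hslice]
    have hdrop : (xs.drop s.toNat).drop k.toNat = xs.drop (s + k).toNat := by
      rw [List.drop_drop]; congr 1; omega
    simp [rowsDrain, hdrop, List.replicate_succ]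

-- while the remainder r is positive the loop's offset equals the row index i₀ and it
-- slices rows of size k+1 starting at (k+1)*i₀: draining r sizes k+1 then cnt sizes k
lemma rowsLoopA_phase1 (xs : List Int) (k : Int) (hk : 0 ≤ k) :
    ∀ (r cnt : Nat) (i₀ s : Int) (rows : List (List Int)),
      0 ≤ i₀ → s = (k + 1) * i₀ →
      rowsLoopA xs k (PySem.List.pyRange i₀ (i₀ + r + cnt) 1) r i₀ rows =
        rows ++ rowsDrain (xs.drop s.toNat)
          (List.replicate r (k + 1) ++ List.replicate cnt k) := by
  intro r
  induction r with
  | zero =>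
    intro cnt i₀ s rows hi hs
    simp only [Nat.cast_zero, add_zero]
    rw [rowsLoopA_phase2 xs k hk cnt i₀ i₀ s rows hi hi (by rw [hs]; ring)]
    simp
  | succ c ih =>
    intro cnt i₀ s rows hi hs
    have hlt : i₀ < i₀ + ((c+1 : Nat) : Int) + cnt := by push_cast; omega
    rw [PySem.List.pyRange_one_cons hlt]
    have hs0 : 0 ≤ s := by have := mul_nonneg (by omega : (0:Int) ≤ k + 1) hi; omega
    have hstep : (k + 1) * (i₀ + 1) = s + (k + 1) := by rw [hs]; ring
    simp only [rowsLoopA, if_pos (by push_cast; omega : ((c+1 : Nat) : Int) ≠ 0)]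
    have hrem : ((c+1 : Nat) : Int) - 1 = ((c : Nat) : Int) := by push_cast; ring
    have hrange : i₀ + ((c+1 : Nat) : Int) + cnt = (i₀ + 1) + ((c : Nat) : Int) + cnt := by
      push_cast; ring
    rw [hrem, hrange, ih cnt (i₀ + 1) (s + (k + 1)) _ (by omega) (by rw [← hstep])]
    have hslice : PySem.List.slice xs (some ((k+1) * i₀)) (some ((k+1) * (i₀ + 1))) =
        (xs.drop s.toNat).take (k+1).toNat := by
      rw [PySem.List.slice_toNat xs (by rw [← hs]; omega) (by rw [hstep]; omega), ← hs, hstep]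
      congr 1; omega
    rw [hslice]
    have hdrop : (xs.drop s.toNat).drop (k+1).toNat = xs.drop (s + (k+1)).toNat := by
      rw [List.drop_drop]; congr 1; omega
    simp [rowsDrain, hdrop, List.replicate_succ]

-- ===== VERDICT (by name: the statement is the Claim_ definition above) =====
theorem rows_distributed_spec : Claim_equal_rows_distributed := by
  intro thelist n _ hn
  simp only [Spec_rows_distributed, rows_distributed, rows_distributed_alt]
  rcases lt_or_gt_of_ne hn with hneg | hpos
  · -- n < 0: range(n) is empty, and both size counts are clamped to 0
    have hm : Int.fmod (thelist.length : Int) n =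
        (thelist.length : Int) % n + if 0 ≤ n ∨ n ∣ (thelist.length : Int) then 0 else n :=
      Int.fmod_eq_emod
    have hml : (thelist.length : Int) % n < -n := by
      rw [← Int.emod_neg]; exact Int.emod_lt_of_pos _ (by omega)
    have hm0 : 0 ≤ (thelist.length : Int) % n := Int.emod_nonneg _ (by omega)
    have hrange : PySem.List.pyRange 0 n 1 = [] := by
      rw [PySem.List.pyRange_one]
      have h0 : (n - 0).toNat = 0 := by omega
      rw [h0]; rfl
    rw [hrange]
    have hmod : PySem.Int.mod (thelist.length : Int) n ≤ 0 ∧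
        n ≤ PySem.Int.mod (thelist.length : Int) n := by
      unfold PySem.Int.mod
      rw [hm]
      split_ifs with h
      · rcases h with h | h
        · omega
        · have : (thelist.length : Int) % n = 0 := Int.emod_eq_zero_of_dvd h
          omega
      · omega
    have h1 : (PySem.Int.mod (thelist.length : Int) n).toNat = 0 := by omega
    have h2 : (n - PySem.Int.mod (thelist.length : Int) n).toNat = 0 := by omega
    rw [h1, h2]
    simp [rowsLoopA, rowsDrain]
  · -- n > 0
    have hk0 : 0 ≤ PySem.Int.floordiv (thelist.length : Int) n := by
      rw [PySem.Int.floordiv_eq_ediv_of_pos hpos]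
      exact Int.ediv_nonneg (by positivity) (by omega)
    have hmE : PySem.Int.mod (thelist.length : Int) n = (thelist.length : Int) % n :=
      PySem.Int.mod_eq_emod_of_pos hpos
    have hm0 : 0 ≤ PySem.Int.mod (thelist.length : Int) n := by
      rw [hmE]; exact Int.emod_nonneg _ (by omega)
    have hmlt : PySem.Int.mod (thelist.length : Int) n < n := by
      rw [hmE]; exact Int.emod_lt_of_pos _ hpos
    set m := PySem.Int.mod (thelist.length : Int) n with hmdef
    set k := PySem.Int.floordiv (thelist.length : Int) n with hkdef
    have hmm : ((m.toNat : Int)) = m := by omega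
    have hn' : (0 : Int) + (m.toNat : Int) + ((n - m).toNat : Int) = n := by omega
    have hmain := rowsLoopA_phase1 thelist k hk0 m.toNat (n - m).toNat 0 0 [] (le_refl 0) (by ring)
    rw [hmm] at hmain
    rw [show (0 : Int) + m + ((n - m).toNat : Int) = n by omega] at hmain
    rw [hmain]
    simp
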